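-- pv_equiv track=rewrite | github.com/phodmin/CodonConcierge | gencode.py | identify_codons
-- ===== SOURCE A (Python) =====
-- def identify_codons(sequence):
--     """Identifies the start and stop codons for a given sequence."""
--     start_codon = 'ATG'
--     stop_codons = ['TAA', 'TAG', 'TGA']
--
--     start_position = sequence.find(start_codon)
--     if start_position == -1:
--         return None, None
--
--     for i in range(start_position + 3, len(sequence) - 2, 3):
--         codon = sequence[i:i+3]
--         if codon in stop_codons:
--             return start_position, i
--     return start_position, None
-- ===== SOURCE B (Python) =====
-- def identify_codons(sequence):
--     """Identifies the start and stop codons for a given sequence."""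
--     start = sequence.find('ATG')
--     if start == -1:
--         return None, None
--     frame = sequence[start + 3:]
--     stops = {'TAA', 'TAG', 'TGA'}
--     for k, codon in enumerate(zip(frame[::3], frame[1::3], frame[2::3])):
--         if ''.join(codon) in stops:
--             return start, start + 3 + 3 * k
--     return start, None
-- ===== Notes on version B (the rewrite author's own statement) =====
-- stated objective: alternative
-- what changed: The explicit index loop over range(start+3, len-2, 3) with per-index slicing is replaced by zipping three strided slices (frame[::3], frame[1::3], frame[2::3]) of the reading frame and scanning the resulting codon triples with enumerate.
import Mathlib
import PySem

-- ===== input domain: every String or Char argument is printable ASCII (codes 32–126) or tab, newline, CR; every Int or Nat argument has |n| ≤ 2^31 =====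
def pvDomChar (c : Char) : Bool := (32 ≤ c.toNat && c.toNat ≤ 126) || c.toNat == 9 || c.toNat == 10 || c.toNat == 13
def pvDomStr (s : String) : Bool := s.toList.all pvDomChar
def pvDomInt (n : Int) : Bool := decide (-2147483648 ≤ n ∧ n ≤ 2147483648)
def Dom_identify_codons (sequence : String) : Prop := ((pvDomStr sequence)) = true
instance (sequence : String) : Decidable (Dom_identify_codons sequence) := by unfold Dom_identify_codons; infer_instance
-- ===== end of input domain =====

-- B replaces A's explicit index loop over range(start+3, len-2, 3) by zipping three strided
-- slices of the reading frame (same cost, different mechanism); objective: alternative.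

-- ===== PORT A =====
-- stop_codons = ['TAA', 'TAG', 'TGA'] (codons handled as their character lists)
def pvStops : List (List Char) := ["TAA".toList, "TAG".toList, "TGA".toList]

-- the for-loop over the index range, with its early return (some i) / fall-through (none)
def pvLoopA (cs : List Char) : List Int → Option Int
  | [] => none
  | i :: rest =>
    let codon := PySem.List.slice cs (some i) (some (i + 3))
    if codon ∈ pvStops then some i else pvLoopA cs rest

def identify_codons (sequence : String) : Option Int × Option Int :=
  let start_position := PySem.Str.find sequence "ATG"
  if start_position = -1 then (none, none)
  else
    (some start_position,
      pvLoopA sequence.toList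
        (PySem.List.pyRange (start_position + 3) (PySem.Str.len sequence - 2) 3))

-- ===== PORT B =====
-- hand port of the step-3 slice frame[::3] (PySem.List.slice? would wrap it in Option);
-- exact for a nonnegative start once the start offset has been dropped
def pvStride3 : List Char → List Char
  | [] => []
  | [a] => [a]
  | [a, _] => [a]
  | a :: _ :: _ :: rest => a :: pvStride3 rest

-- stops = {'TAA', 'TAG', 'TGA'} (a set in B)
def pvStopsB : PySem.Set (List Char) := PySem.Set.ofList ["TAA".toList, "TAG".toList, "TGA".toList]

-- the for-loop over enumerate(zip(...)); ''.join of a char triple is the 3-char codon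
def pvLoopB (start : Int) : List (Char × Char × Char) → Int → Option Int
  | [], _ => none
  | (a, b, c) :: rest, k =>
    if [a, b, c] ∈ pvStopsB then some (start + 3 + 3 * k) else pvLoopB start rest (k + 1)

def identify_codons_alt (sequence : String) : Option Int × Option Int :=
  let start := PySem.Str.find sequence "ATG"
  if start = -1 then (none, none)
  else
    let frame := (PySem.Str.slice sequence (some (start + 3)) none).toList
    (some start,
      pvLoopB start
        ((pvStride3 frame).zip ((pvStride3 (frame.drop 1)).zip (pvStride3 (frame.drop 2)))) 0)

-- ===== PRECONDITION & SPEC =====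
def Spec_identify_codons (sequence : String) (out : Option Int × Option Int) : Prop := out = identify_codons_alt sequence
instance (sequence : String) (out : Option Int × Option Int) : Decidable (Spec_identify_codons sequence out) := by unfold Spec_identify_codons; infer_instance

-- ===== CLAIM (what is proved, stated in full; the proofs are below) =====
def Claim_equal_identify_codons : Prop := ∀ (sequence : String), Dom_identify_codons sequence → Spec_identify_codons sequence (identify_codons sequence)

-- ===== LEMMAS AND PROOFS =====

-- common characterisation both loops are reduced to: walk the list codon by codon
def pvChunkFind : List Char → Int → Option Int
  | a :: b :: c :: r, j => if [a, b, c] ∈ pvStops then some j else pvChunkFind r (j + 3)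
  | _, _ => none

theorem pyRange3_nil (a b : Int) (h : b ≤ a) : PySem.List.pyRange a b 3 = [] := by
  rw [PySem.List.pyRange_of_pos a b (by norm_num)]
  rw [if_neg (by omega)]
  simp

theorem pyRange3_cons (a b : Int) (h : a < b) :
    PySem.List.pyRange a b 3 = a :: PySem.List.pyRange (a + 3) b 3 := by
  rw [PySem.List.pyRange_of_pos a b (by norm_num), PySem.List.pyRange_of_pos (a + 3) b (by norm_num)]
  rw [if_pos h]
  by_cases h3 : a + 3 < b
  · rw [if_pos h3]
    have hq : ((b - a + 3 - 1) / 3).toNat = ((b - (a + 3) + 3 - 1) / 3).toNat + 1 := by omega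
    rw [hq, List.range_succ_eq_map, List.map_cons, List.map_map]
    refine congrArg₂ _ (by ring) ?_
    refine List.map_congr_left (fun x _ => ?_)
    simp [Function.comp]
    ring
  · rw [if_neg h3]
    have hq : ((b - a + 3 - 1) / 3).toNat = 1 := by omega
    simp [hq]

theorem loopA_eq_chunk (cs : List Char) (j : Nat) :
    pvLoopA cs (PySem.List.pyRange (j : Int) ((cs.length : Int) - 2) 3) = pvChunkFind (cs.drop j) (j : Int) := by
  by_cases hlt : (j : Int) < (cs.length : Int) - 2
  · have hj3 : j + 3 ≤ cs.length := by omega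
    have hlen : 3 ≤ (cs.drop j).length := by simp; omega
    rcases hd : cs.drop j with _ | ⟨a, _ | ⟨b, _ | ⟨c, r⟩⟩⟩ <;> rw [hd] at hlen <;> simp at hlen
    have hslice : PySem.List.slice cs (some (j : Int)) (some ((j : Int) + 3)) = [a, b, c] := by
      have h := PySem.List.slice_natCast_add cs j 3
      simpa [hd] using h
    rw [pyRange3_cons _ _ hlt, pvLoopA, hslice, pvChunkFind]
    by_cases hs : [a, b, c] ∈ pvStops
    · simp [hs]
    · simp only [hs, if_false]
      have hrec := loopA_eq_chunk cs (j + 3)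
      have hdrop : cs.drop (j + 3) = r := by
        have : cs.drop (j + 3) = (cs.drop j).drop 3 := by
          rw [List.drop_drop]
        rw [this, hd]
        rfl
      rw [hdrop] at hrec
      rw [show ((j : Int) + 3) = ((j + 3 : Nat) : Int) by push_cast; ring]
      rw [hrec]
  · rw [pyRange3_nil _ _ (by omega)]
    have hlen : (cs.drop j).length ≤ 2 := by simp; omega
    rcases hd : cs.drop j with _ | ⟨a, _ | ⟨b, _ | ⟨c, r⟩⟩⟩ <;> rw [hd] at hlen <;>
      simp [pvLoopA, pvChunkFind] at hlen ⊢
termination_by cs.length - j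

theorem loopB_eq_chunk (start : Int) (l : List Char) (k : Int) :
    pvLoopB start ((pvStride3 l).zip ((pvStride3 (l.drop 1)).zip (pvStride3 (l.drop 2)))) k
      = pvChunkFind l (start + 3 + 3 * k) := by
  match l with
  | [] => simp [pvStride3, pvLoopB, pvChunkFind]
  | [a] => simp [pvStride3, pvLoopB, pvChunkFind]
  | [a, b] => simp [pvStride3, pvLoopB, pvChunkFind]
  | a :: b :: c :: r =>
    have e2 : pvStride3 (b :: c :: r) = b :: pvStride3 (r.drop 1) := by
      cases r <;> simp [pvStride3]
    have e3 : pvStride3 (c :: r) = c :: pvStride3 (r.drop 2) := by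
      match r with
      | [] => simp [pvStride3]
      | [x] => simp [pvStride3]
      | x :: y :: t => simp [pvStride3]
    have hstops : ∀ x : List Char, x ∈ pvStopsB ↔ x ∈ pvStops := by
      intro x
      rw [show pvStopsB = (pvStops : PySem.Set (List Char)) from by decide]
    simp only [List.drop_succ_cons, List.drop_zero, pvStride3, e2, e3, List.zip_cons_cons]
    rw [pvLoopB, pvChunkFind]
    simp only [hstops]
    by_cases hs : [a, b, c] ∈ pvStops
    · simp [hs]
    · simp only [hs, if_false]
      rw [loopB_eq_chunk start r (k + 1)]
      ring_nf

-- ===== VERDICT (by name: the statement is the Claim_ definition above) =====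
theorem identify_codons_spec : Claim_equal_identify_codons := by
  intro sequence _hdom
  unfold Spec_identify_codons identify_codons identify_codons_alt
  set f := PySem.Str.find sequence "ATG" with hf
  by_cases h1 : f = -1
  · simp [h1]
  · simp only [h1, if_false]
    have hfe : f = PySem.Chars.find sequence.toList ("ATG".toList) := by
      rw [hf, PySem.Str.find_eq]
    have hnn : 0 ≤ f := by
      have h2 := PySem.Chars.neg_one_le_find sequence.toList ("ATG".toList)
      rw [hfe] at h1 ⊢
      omega
    obtain ⟨s, hs⟩ : ∃ s : Nat, f = (s : Int) := ⟨f.toNat, (Int.toNat_of_nonneg hnn).symm⟩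
    have hframe : (PySem.Str.slice sequence (some (f + 3)) none).toList
        = sequence.toList.drop (s + 3) := by
      rw [hs]
      simp [PySem.Chars.slice_eq_listSlice]
      rw [show ((s : Int) + 3) = ((s + 3 : Nat) : Int) by push_cast; ring]
      rw [PySem.List.slice_from_natCast]
    have hA := loopA_eq_chunk sequence.toList (s + 3)
    have hB := loopB_eq_chunk f (sequence.toList.drop (s + 3)) 0
    rw [hframe, hB, hs]
    rw [show ((s : Int) + 3) = ((s + 3 : Nat) : Int) by push_cast; ring]
    simp only [PySem.Str.len_eq]
    rw [hA]
    norm_num
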